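-- pv_equiv track=rewrite | github.com/kimgyuhee/Python | Chapter0_Algorithm/230406/test06.py | solution
-- ===== SOURCE A (Python) =====
-- def solution(before, after):
--     case1 = ""
--     case2 = ""
--     for i in range(len(before)) :
--         case1 +=before[len(before)-1-i]
--
--     if case1 == after :
--         return 1
--     else :
--         return 0
-- ===== SOURCE B (Python) =====
-- def solution(before, after):
--     n = len(before)
--     if n != len(after):
--         return 0
--     for i in range(n):
--         if before[i] != after[n - 1 - i]:
--             return 0
--     return 1
-- ===== Notes on version B (the rewrite author's own statement) =====
-- stated objective: alternative
-- what changed: B replaces A's build-the-reversed-string-then-compare with a length guard plus an early-exit pairwise index check; no reversed string is materialised.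
import Mathlib
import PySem

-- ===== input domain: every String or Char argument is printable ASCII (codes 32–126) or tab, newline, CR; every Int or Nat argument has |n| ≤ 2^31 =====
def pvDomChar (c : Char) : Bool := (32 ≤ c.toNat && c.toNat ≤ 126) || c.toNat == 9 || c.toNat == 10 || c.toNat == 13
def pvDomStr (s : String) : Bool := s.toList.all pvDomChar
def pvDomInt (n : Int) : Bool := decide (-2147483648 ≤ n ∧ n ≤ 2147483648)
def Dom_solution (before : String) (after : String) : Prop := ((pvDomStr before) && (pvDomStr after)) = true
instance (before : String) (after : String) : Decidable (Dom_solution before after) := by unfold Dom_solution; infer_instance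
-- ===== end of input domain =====

-- B replaces A's build-the-reversed-string-then-compare with a length guard plus
-- an early-exit pairwise index check; no reversed string is materialised.

-- ===== PORT A =====
def solution (before : String) (after : String) : Int :=
  let bs := before.toList
  let n : Int := bs.length
  let case1 : List Char :=
    (PySem.List.pyRange 0 n 1).foldl
      (fun acc i => acc ++ (PySem.List.pyGet? bs (n - 1 - i)).toList) []
  if case1 = after.toList then 1 else 0

-- ===== PORT B =====
-- the 'for i in range(n): if before[i] != after[n-1-i]: return 0' loop of Source B
def pvPairLoop (bs as' : List Char) (i : Nat) : Bool :=
  if _h : i < bs.length then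
    if bs[i]? = as'[bs.length - 1 - i]? then pvPairLoop bs as' (i + 1) else false
  else true
termination_by bs.length - i

def solution_alt (before : String) (after : String) : Int :=
  let bs := before.toList
  let as' := after.toList
  if bs.length ≠ as'.length then 0
  else if pvPairLoop bs as' 0 then 1 else 0

-- ===== PRECONDITION & SPEC =====
def Spec_solution (before : String) (after : String) (out : Int) : Prop := out = solution_alt before after
instance (before : String) (after : String) (out : Int) : Decidable (Spec_solution before after out) := by unfold Spec_solution; infer_instance

-- ===== CLAIM (what is proved, stated in full; the proofs are below) =====
def Claim_equal_solution : Prop := ∀ (before : String) (after : String), Dom_solution before after → Spec_solution before after (solution before after)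

-- ===== LEMMAS AND PROOFS =====

-- A's loop builds the reverse of bs
lemma pvCase1_eq_reverse (bs : List Char) :
    (PySem.List.pyRange 0 (bs.length : Int) 1).foldl
      (fun acc i => acc ++ (PySem.List.pyGet? bs ((bs.length : Int) - 1 - i)).toList) []
      = bs.reverse := by
  rw [PySem.List.foldl_append_eq_flatMap]
  rw [PySem.List.pyRange_one]
  simp only [List.flatMap_map, List.nil_append, Int.zero_add, Int.sub_zero, Int.toNat_natCast]
  have h : ∀ k, k ∈ List.range bs.length →
      (PySem.List.pyGet? bs ((bs.length : Int) - 1 - (k : Int))).toList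
        = (fun k => [bs.getD (bs.length - 1 - k) 'a']) k := by
    intro k hk
    simp only [List.mem_range] at hk
    have h1 : ((bs.length : Int) - 1 - (k : Int)) = ((bs.length - 1 - k : Nat) : Int) := by
      omega
    have h2 : bs.length - 1 - k < bs.length := by omega
    rw [h1, PySem.List.pyGet?_natCast, List.getElem?_eq_getElem h2]
    simp [List.getD, List.getElem?_eq_getElem h2]
  rw [List.flatMap_congr h]
  have hsingle : ∀ (l : List Nat) (f : Nat → Char),
      l.flatMap (fun k => [f k]) = l.map f := by
    intro l f
    induction l with
    | nil => rfl
    | cons x xs ih => simp [List.flatMap_cons, ih]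
  rw [hsingle]
  apply List.ext_getElem
  · simp
  · intro i h1 h2
    have h3 : bs.length - 1 - i < bs.length := by simp at h2; omega
    simp only [List.getElem_map, List.getElem_range, List.getElem_reverse]
    rw [List.getD_eq_getElem _ _ h3]

-- B's loop checks the pairwise condition from index i on
lemma pvPairLoop_iff (bs as' : List Char) (i : Nat) :
    pvPairLoop bs as' i = true ↔
      ∀ j, i ≤ j → j < bs.length → bs[j]? = as'[bs.length - 1 - j]? := by
  suffices hfuel : ∀ (fuel k : Nat), bs.length - k ≤ fuel →
      (pvPairLoop bs as' k = true ↔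
        ∀ j, k ≤ j → j < bs.length → bs[j]? = as'[bs.length - 1 - j]?) from
    hfuel (bs.length - i) i le_rfl
  intro fuel
  induction fuel with
  | zero =>
    intro k hk
    rw [pvPairLoop]
    have hnk : ¬ k < bs.length := by omega
    rw [dif_neg hnk]
    simp only [true_iff]
    intro j hij hj
    exact absurd (by omega : k < bs.length) hnk
  | succ n ihn =>
    intro k hk
    rw [pvPairLoop]
    split
    · rename_i h
      split
      · rename_i heq
        rw [ihn (k + 1) (by omega)]
        constructor
        · intro hall j hij hj
          rcases Nat.eq_or_lt_of_le hij with rfl | hlt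
          · exact heq
          · exact hall j hlt hj
        · intro hall j hij hj
          exact hall j (by omega) hj
      · rename_i hne
        simp only [Bool.false_eq_true, false_iff]
        intro hall
        exact hne (hall k le_rfl h)
    · rename_i h
      simp only [true_iff]
      intro j hij hj
      exact absurd (by omega : k < bs.length) h

-- the two acceptance conditions coincide
lemma pvRev_iff (bs as' : List Char) :
    bs.reverse = as' ↔
      (bs.length = as'.length ∧
        ∀ j, j < bs.length → bs[j]? = as'[bs.length - 1 - j]?) := by
  constructor
  · rintro rfl
    refine ⟨by simp, fun j hj => ?_⟩
    have h1 : bs.length - 1 - j < bs.reverse.length := by rw [List.length_reverse]; omega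
    have h4 : bs.length - 1 - (bs.length - 1 - j) = j := by omega
    rw [List.getElem?_eq_getElem h1, List.getElem_reverse]
    simp [h4, List.getElem?_eq_getElem hj]
  · rintro ⟨hlen, hall⟩
    apply List.ext_getElem?
    intro i
    by_cases hi : i < bs.length
    · have h1 : i < bs.reverse.length := by simpa using hi
      have h2 : bs.length - 1 - i < bs.length := by omega
      rw [List.getElem?_eq_getElem h1, List.getElem_reverse]
      have := hall (bs.length - 1 - i) h2
      have h3 : bs.length - 1 - (bs.length - 1 - i) = i := by omega
      rw [h3] at this
      rw [← this, List.getElem?_eq_getElem h2]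
    · rw [List.getElem?_eq_none (by simpa using not_lt.mp hi),
        List.getElem?_eq_none (by omega)]

-- ===== VERDICT (by name: the statement is the Claim_ definition above) =====
theorem solution_spec : Claim_equal_solution := by
  intro before after _
  unfold Spec_solution solution solution_alt
  simp only
  rw [pvCase1_eq_reverse before.toList]
  by_cases hlen : before.toList.length = after.toList.length
  · simp only [hlen, ne_eq, not_true_eq_false, if_false]
    by_cases hrev : before.toList.reverse = after.toList
    · have := (pvRev_iff before.toList after.toList).mp hrev
      rw [if_pos hrev,
        if_pos ((pvPairLoop_iff before.toList after.toList 0).mpr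
          (fun j _ hj => this.2 j hj))]
    · rw [if_neg hrev]
      have : ¬ pvPairLoop before.toList after.toList 0 = true := by
        intro hp
        exact hrev ((pvRev_iff _ _).mpr
          ⟨hlen, fun j hj => (pvPairLoop_iff _ _ 0).mp hp j (Nat.zero_le j) hj⟩)
      simp [this]
  · have hrev : ¬ before.toList.reverse = after.toList := by
      intro h
      exact hlen (by simpa using congrArg List.length h)
    rw [if_neg hrev, if_pos hlen]
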